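-- pv_equiv track=rewrite | github.com/jsh/PythonPowerTools | python/test.py | find_next_op
-- ===== SOURCE A (Python) =====
-- def find_next_op(tokens, start_index):
--     """Finds the next operator with a given precedence."""
--     precedence = {'-a': 2, '-o': 1}
--     op = None
--     op_index = -1
--     current_precedence = 0
--
--     for i in range(start_index, len(tokens)):
--         token = tokens[i]
--         if token in precedence and precedence[token] > current_precedence:
--             op = token
--             op_index = i
--             current_precedence = precedence[token]
--
--     return op, op_index
-- ===== SOURCE B (Python) =====
-- def find_next_op(tokens, start_index):
--     """Finds the next operator with a given precedence."""
--     indices = range(start_index, len(tokens))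
--     for op in ('-a', '-o'):
--         for i in indices:
--             if tokens[i] == op:
--                 return op, i
--     return None, -1
-- ===== Notes on version B (the rewrite author's own statement) =====
-- stated objective: simpler
-- what changed: Replaces the single accumulator scan that tracks a running best precedence with a priority search: look for the first '-a' in the index range, then for the first '-o', else (None, -1).
import Mathlib
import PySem

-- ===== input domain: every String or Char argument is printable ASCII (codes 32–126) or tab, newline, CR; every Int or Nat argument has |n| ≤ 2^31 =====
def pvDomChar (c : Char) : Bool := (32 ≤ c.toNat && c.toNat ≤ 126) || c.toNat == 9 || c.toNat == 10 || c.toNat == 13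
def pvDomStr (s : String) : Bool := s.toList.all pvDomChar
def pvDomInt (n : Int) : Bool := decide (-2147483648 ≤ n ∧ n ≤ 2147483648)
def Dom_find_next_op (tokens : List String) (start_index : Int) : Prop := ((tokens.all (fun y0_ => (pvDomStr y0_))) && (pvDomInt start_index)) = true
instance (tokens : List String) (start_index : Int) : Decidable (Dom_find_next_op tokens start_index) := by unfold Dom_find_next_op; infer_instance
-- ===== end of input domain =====

-- B replaces A's running-best-precedence scan with a priority search (first '-a' in range, else first '-o'); same cost, simpler.

-- ===== PORT A =====
-- loop body of A; token = tokens[i] is exact inside Pre_ (getD's default is never used there)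
def fnoStep (tokens : List String) (st : Option String × Int × Int) (i : Int) : Option String × Int × Int :=
  let token := (PySem.List.pyGet? tokens i).getD ""
  match (PySem.Dict.ofList [("-a", (2 : Int)), ("-o", 1)]).get? token with
  | some p => if st.2.2 < p then (some token, i, p) else st
  | none => st

def find_next_op (tokens : List String) (start_index : Int) : Option String × Int :=
  let r := (PySem.List.pyRange start_index (tokens.length : Int) 1).foldl (fnoStep tokens) (none, -1, 0)
  (r.1, r.2.1)

-- ===== PORT B =====
-- inner loop of B: first index i in idxs with tokens[i] == op (tokens[i] exact inside Pre_)
def fnoFirst (tokens : List String) (op : String) : List Int → Option Int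
  | [] => none
  | i :: rest => if (PySem.List.pyGet? tokens i).getD "" = op then some i else fnoFirst tokens op rest

def find_next_op_alt (tokens : List String) (start_index : Int) : Option String × Int :=
  let idxs := PySem.List.pyRange start_index (tokens.length : Int) 1
  match fnoFirst tokens "-a" idxs with
  | some i => (some "-a", i)
  | none =>
    match fnoFirst tokens "-o" idxs with
    | some i => (some "-o", i)
    | none => (none, -1)

-- ===== PRECONDITION & SPEC =====
-- Pre_ excludes exactly the inputs where the Python A raises IndexError (start_index < -len(tokens) with a nonempty index range); B raises there too.
def Pre_find_next_op (tokens : List String) (start_index : Int) : Prop :=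
  -(tokens.length : Int) ≤ start_index ∨ (tokens.length : Int) ≤ start_index
instance (tokens : List String) (start_index : Int) : Decidable (Pre_find_next_op tokens start_index) := by unfold Pre_find_next_op; infer_instance

def pvWitness_find_next_op : List String × Int := (["-o", "x", "-a"], 0)

def Spec_find_next_op (tokens : List String) (start_index : Int) (out : Option String × Int) : Prop := out = find_next_op_alt tokens start_index
instance (tokens : List String) (start_index : Int) (out : Option String × Int) : Decidable (Spec_find_next_op tokens start_index out) := by unfold Spec_find_next_op; infer_instance

-- ===== CLAIM (what is proved, stated in full; the proofs are below) =====
def Claim_equal_find_next_op : Prop := ∀ (tokens : List String) (start_index : Int), Dom_find_next_op tokens start_index → Pre_find_next_op tokens start_index → Spec_find_next_op tokens start_index (find_next_op tokens start_index)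

-- ===== LEMMAS AND PROOFS =====

lemma fno_lookup (tok : String) :
    (PySem.Dict.ofList [("-a", (2 : Int)), ("-o", 1)]).get? tok =
      if tok = "-a" then some 2 else if tok = "-o" then some 1 else none := by
  have h : PySem.Dict.ofList [("-a", (2 : Int)), ("-o", 1)] = PySem.Dict.mk [("-a", 2), ("-o", 1)] := by decide
  rw [h, PySem.Dict.get?_mk_cons, PySem.Dict.get?_mk_cons]
  by_cases h1 : tok = "-a"
  · subst h1; simp
  · by_cases h2 : tok = "-o"
    · subst h2; simp
    · have e1 : ("-a" == tok) = false := beq_eq_false_iff_ne.mpr (fun e => h1 e.symm)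
      have e2 : ("-o" == tok) = false := beq_eq_false_iff_ne.mpr (fun e => h2 e.symm)
      rw [e1, e2]
      simp [h1, h2, PySem.Dict.get?]

lemma fnoStep_a (tokens : List String) (st : Option String × Int × Int) (i : Int)
    (h : (PySem.List.pyGet? tokens i).getD "" = "-a") :
    fnoStep tokens st i = if st.2.2 < 2 then (some "-a", i, 2) else st := by
  unfold fnoStep
  rw [h]
  simp only [fno_lookup]
  simp

lemma fnoStep_o (tokens : List String) (st : Option String × Int × Int) (i : Int)
    (h : (PySem.List.pyGet? tokens i).getD "" = "-o") :
    fnoStep tokens st i = if st.2.2 < 1 then (some "-o", i, 1) else st := by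
  unfold fnoStep
  rw [h]
  simp only [fno_lookup]
  simp

lemma fnoStep_other (tokens : List String) (st : Option String × Int × Int) (i : Int)
    (h1 : (PySem.List.pyGet? tokens i).getD "" ≠ "-a")
    (h2 : (PySem.List.pyGet? tokens i).getD "" ≠ "-o") :
    fnoStep tokens st i = st := by
  unfold fnoStep
  simp only [fno_lookup]
  simp [h1, h2]

lemma fno_absorb (tokens : List String) :
    ∀ (idxs : List Int) (i : Int),
      idxs.foldl (fnoStep tokens) (some "-a", i, 2) = (some "-a", i, 2) := by
  intro idxs
  induction idxs with
  | nil => intro i; rfl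
  | cons j rest ih =>
    intro i
    have hstep : fnoStep tokens (some "-a", i, 2) j = (some "-a", i, 2) := by
      by_cases h1 : (PySem.List.pyGet? tokens j).getD "" = "-a"
      · rw [fnoStep_a tokens _ j h1]; simp
      · by_cases h2 : (PySem.List.pyGet? tokens j).getD "" = "-o"
        · rw [fnoStep_o tokens _ j h2]; simp
        · exact fnoStep_other tokens _ j h1 h2
    rw [List.foldl_cons, hstep, ih]

lemma fno_fromO (tokens : List String) :
    ∀ (idxs : List Int) (j : Int),
      idxs.foldl (fnoStep tokens) (some "-o", j, 1) =
        match fnoFirst tokens "-a" idxs with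
        | some k => (some "-a", k, 2)
        | none => (some "-o", j, 1) := by
  intro idxs
  induction idxs with
  | nil => intro j; rfl
  | cons i rest ih =>
    intro j
    by_cases h1 : (PySem.List.pyGet? tokens i).getD "" = "-a"
    · rw [List.foldl_cons, fnoStep_a tokens _ i h1]
      simp only [fnoFirst, h1, if_pos]
      rw [if_pos (by norm_num), fno_absorb]
    · by_cases h2 : (PySem.List.pyGet? tokens i).getD "" = "-o"
      · rw [List.foldl_cons, fnoStep_o tokens _ i h2]
        rw [if_neg (by norm_num), ih]
        simp only [fnoFirst, h2]
        rw [if_neg (show ("-o" : String) ≠ "-a" by decide)]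
      · rw [List.foldl_cons, fnoStep_other tokens _ i h1 h2]
        simp only [fnoFirst, if_neg h1]
        exact ih j

lemma fno_fold_char (tokens : List String) :
    ∀ idxs : List Int,
      idxs.foldl (fnoStep tokens) (none, -1, 0) =
        match fnoFirst tokens "-a" idxs with
        | some k => (some "-a", k, 2)
        | none =>
          match fnoFirst tokens "-o" idxs with
          | some j => (some "-o", j, 1)
          | none => (none, -1, 0) := by
  intro idxs
  induction idxs with
  | nil => rfl
  | cons i rest ih =>
    by_cases h1 : (PySem.List.pyGet? tokens i).getD "" = "-a"
    · rw [List.foldl_cons, fnoStep_a tokens _ i h1]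
      simp only [fnoFirst, h1, if_pos]
      rw [if_pos (by norm_num), fno_absorb]
    · by_cases h2 : (PySem.List.pyGet? tokens i).getD "" = "-o"
      · rw [List.foldl_cons, fnoStep_o tokens _ i h2]
        rw [if_pos (by norm_num), fno_fromO]
        simp only [fnoFirst, h2]
        rw [if_neg (show ("-o" : String) ≠ "-a" by decide)]
        cases fnoFirst tokens "-a" rest <;> simp
      · rw [List.foldl_cons, fnoStep_other tokens _ i h1 h2]
        simp only [fnoFirst, if_neg h1, if_neg h2]
        exact ih

-- ===== VERDICT (by name: the statement is the Claim_ definition above) =====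
theorem find_next_op_spec : Claim_equal_find_next_op := by
  intro tokens start_index _ _
  unfold Spec_find_next_op find_next_op find_next_op_alt
  rw [fno_fold_char]
  cases h1 : fnoFirst tokens "-a" (PySem.List.pyRange start_index (tokens.length : Int) 1) with
  | some k => simp [h1]
  | none =>
    cases h2 : fnoFirst tokens "-o" (PySem.List.pyRange start_index (tokens.length : Int) 1) <;> simp [h1, h2]
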